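-- pv_equiv track=rewrite | github.com/Shinichi0713/codility_2-2 | solution.py | solution
-- ===== SOURCE A (Python) =====
-- def solution(A):
--     # Implement your solution here
--     dict_found = {}
--     leng_array = len(A)
--
--     for i in range(leng_array-1, -1, -1):
--         if A[i] in dict_found.keys():
--             dict_found[A[i]] += 1
--         else:
--             dict_found[A[i]] = 1
--
--     for key, value in dict_found.items():
--         if value % 2 == 1:
--             return key
--     return None
-- ===== SOURCE B (Python) =====
-- def solution(A):
--     # parity set: after the loop, `odd` holds exactly the values with odd count
--     odd = set()
--     for x in A:
--         if x in odd:
--             odd.remove(x)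
--         else:
--             odd.add(x)
--     for x in reversed(A):
--         if x in odd:
--             return x
--     return None
-- ===== Notes on version B (the rewrite author's own statement) =====
-- stated objective: alternative
-- what changed: B keeps no counts at all: it maintains a parity set by toggling membership (add if absent, remove if present), so the set ends up holding exactly the odd-count values, and then returns the first member found while scanning the list in reverse; A counts every element into a dict and scans the dict's keys for an odd tally.
import Mathlib
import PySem

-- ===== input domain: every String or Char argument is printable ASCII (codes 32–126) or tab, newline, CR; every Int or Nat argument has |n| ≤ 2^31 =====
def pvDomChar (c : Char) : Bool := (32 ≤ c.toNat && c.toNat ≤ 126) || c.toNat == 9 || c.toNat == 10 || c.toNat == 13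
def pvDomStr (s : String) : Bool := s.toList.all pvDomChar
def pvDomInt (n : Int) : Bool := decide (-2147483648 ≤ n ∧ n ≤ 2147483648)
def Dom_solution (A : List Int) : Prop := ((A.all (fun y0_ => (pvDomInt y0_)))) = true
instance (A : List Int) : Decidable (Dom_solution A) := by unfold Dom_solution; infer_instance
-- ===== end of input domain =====

-- B keeps a parity set (toggle membership per element) instead of counting, then scans the list in reverse.

-- ===== PORT A =====
-- 'for key, value in dict_found.items(): if value % 2 == 1: return key'
def pvFindOddItem : List (Int × Int) → Option Int
  | [] => none
  | (k, v) :: rest => if PySem.Int.mod v 2 = 1 then some k else pvFindOddItem rest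

def solution (A : List Int) : Option Int :=
  let lengArray : Int := A.length
  -- indices of range(len-1, -1, -1) are always in range, so A[i] is pyGetD
  let dictFound : PySem.Dict Int Int :=
    (PySem.List.pyRange (lengArray - 1) (-1) (-1)).foldl
      (fun d i =>
        if d.contains (PySem.List.pyGetD A i 0)
        then d.modify (PySem.List.pyGetD A i 0) 0 (· + 1)
        else d.insert (PySem.List.pyGetD A i 0) 1)
      PySem.Dict.empty
  pvFindOddItem dictFound.items

-- ===== PORT B =====
-- 'if x in odd: odd.remove(x) else: odd.add(x)' — remove is guarded by the membership test,
-- so Set.discard (remove-if-present) is exact here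
def pvToggle (s : PySem.Set Int) (x : Int) : PySem.Set Int :=
  if PySem.Set.contains s x then PySem.Set.discard s x else PySem.Set.add s x

-- 'for x in reversed(A): if x in odd: return x'
def pvScanMem (odd : PySem.Set Int) : List Int → Option Int
  | [] => none
  | x :: rest => if PySem.Set.contains odd x then some x else pvScanMem odd rest

def solution_alt (A : List Int) : Option Int :=
  let odd : PySem.Set Int := A.foldl pvToggle PySem.Set.empty
  pvScanMem odd A.reverse

-- ===== PRECONDITION & SPEC =====
def Spec_solution (A : List Int) (out : Option Int) : Prop := out = solution_alt A
instance (A : List Int) (out : Option Int) : Decidable (Spec_solution A out) := by unfold Spec_solution; infer_instance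

-- ===== CLAIM (what is proved, stated in full; the proofs are below) =====
def Claim_equal_solution : Prop := ∀ (A : List Int), Dom_solution A → Spec_solution A (solution A)

-- ===== LEMMAS AND PROOFS =====

theorem pv_step_eq (d : PySem.Dict Int Int) (x : Int) :
    (if d.contains x then d.modify x 0 (· + 1) else d.insert x 1) = d.modify x 0 (· + 1) := by
  by_cases h : d.contains x
  · simp [h]
  · simp only [h, Bool.false_eq_true, if_false]
    unfold PySem.Dict.modify
    rw [PySem.Dict.getD_of_not_contains]
    · norm_num
    · simpa using h

theorem pv_findOddItem_map (c : Int → Int) (s : List Int) :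
    pvFindOddItem (s.map (fun k => (k, c k))) =
      s.find? (fun k => PySem.Int.mod (c k) 2 == 1) := by
  induction s with
  | nil => rfl
  | cons a t ih =>
    simp only [List.map_cons, pvFindOddItem, List.find?]
    split_ifs with h
    · rw [show (PySem.Int.mod (c a) 2 == 1) = true from by simpa using h]
    · rw [show (PySem.Int.mod (c a) 2 == 1) = false from by simpa using h]
      exact ih

theorem pv_find?_filter_ne (p : Int → Bool) (x : Int) (hx : p x = false) (s : List Int) :
    (s.filter (fun y => !(y == x))).find? p = s.find? p := by
  induction s with
  | nil => rfl
  | cons a t ih =>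
    rw [List.filter_cons]
    by_cases hax : a = x
    · subst hax
      simp only [BEq.rfl, Bool.not_true, Bool.false_eq_true, if_false]
      rw [ih, List.find?_cons_of_neg (by simp [hx])]
    · have hcond : (!(a == x)) = true := by simp [hax]
      rw [if_pos hcond]
      cases hpa : p a
      · rw [List.find?_cons_of_neg (by simp [hpa]), List.find?_cons_of_neg (by simp [hpa]), ih]
      · rw [List.find?_cons_of_pos hpa, List.find?_cons_of_pos hpa]

theorem pv_discard_eq_filter (s : List Int) (x : Int) :
    PySem.Set.discard s x = s.filter (fun y => !(y == x)) := by
  unfold PySem.Set.discard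
  rfl

theorem pv_find?_ofList (p : Int → Bool) (l : List Int) :
    (PySem.Set.ofList l).find? p = l.find? p := by
  induction l with
  | nil => rfl
  | cons a t ih =>
    rw [PySem.Set.ofList_cons]
    cases hpa : p a
    · rw [List.find?_cons_of_neg (by simp [hpa]), List.find?_cons_of_neg (by simp [hpa]),
        pv_discard_eq_filter, pv_find?_filter_ne p a hpa, ih]
    · rw [List.find?_cons_of_pos hpa, List.find?_cons_of_pos hpa]

theorem pvA_dict (A : List Int) :
    (PySem.List.pyRange ((A.length : Int) - 1) (-1) (-1)).foldl
      (fun (d : PySem.Dict Int Int) i =>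
        if d.contains (PySem.List.pyGetD A i 0)
        then d.modify (PySem.List.pyGetD A i 0) 0 (· + 1)
        else d.insert (PySem.List.pyGetD A i 0) 1)
      PySem.Dict.empty
      = PySem.Dict.counter A.reverse := by
  rw [PySem.List.pyRange_neg_one_eq_reverse]
  rw [show ((-1 : Int) + 1) = 0 by norm_num,
    show ((A.length : Int) - 1 + 1) = (A.length : Int) by ring]
  have e1 : (PySem.List.pyRange 0 ((A.length : Int)) 1).reverse.foldl
      (fun (d : PySem.Dict Int Int) i =>
        if d.contains (PySem.List.pyGetD A i 0)
        then d.modify (PySem.List.pyGetD A i 0) 0 (· + 1)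
        else d.insert (PySem.List.pyGetD A i 0) 1)
      PySem.Dict.empty
      = ((PySem.List.pyRange 0 ((A.length : Int)) 1).reverse.map
          (fun i => PySem.List.pyGetD A i 0)).foldl
          (fun (d : PySem.Dict Int Int) x =>
            if d.contains x then d.modify x 0 (· + 1) else d.insert x 1)
          PySem.Dict.empty :=
    (List.foldl_map (f := fun i => PySem.List.pyGetD A i 0)
      (g := fun (d : PySem.Dict Int Int) x =>
        if d.contains x then d.modify x 0 (· + 1) else d.insert x 1)).symm
  rw [e1, List.map_reverse, PySem.List.map_pyGetD_pyRange_zero']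
  have h2 : (fun (d : PySem.Dict Int Int) x =>
      if d.contains x then d.modify x 0 (· + 1) else d.insert x 1)
      = (fun (d : PySem.Dict Int Int) x => d.modify x 0 (· + 1)) := by
    funext d x; exact pv_step_eq d x
  rw [h2, PySem.Dict.counter_eq_foldl]

-- membership after one toggle step
theorem pv_contains_toggle (s : PySem.Set Int) (x y : Int) :
    PySem.Set.contains (pvToggle s x) y =
      if y = x then !PySem.Set.contains s x else PySem.Set.contains s y := by
  unfold pvToggle
  by_cases hsx : PySem.Set.contains s x
  · rw [if_pos hsx, pv_discard_eq_filter]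
    by_cases hyx : y = x
    · subst hyx
      have hm : y ∈ s := by simpa [PySem.Set.contains] using hsx
      simp [PySem.Set.contains, List.mem_filter, hm]
    · simp [PySem.Set.contains, List.mem_filter, hyx]
  · rw [if_neg (by simpa using hsx)]
    by_cases hyx : y = x
    · subst hyx
      have hm : y ∉ s := by simpa [PySem.Set.contains] using hsx
      simp [PySem.Set.add, PySem.Set.contains, hm]
    · by_cases hx : x ∈ s <;> simp [PySem.Set.add, PySem.Set.contains, hx, hyx]

theorem pv_decide_succ_mod_two (n : Nat) :
    decide ((n + 1) % 2 = 1) = !decide (n % 2 = 1) := by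
  rcases Nat.mod_two_eq_zero_or_one n with h | h <;> simp [Nat.add_mod, h]

-- the parity-set invariant: membership after folding = initial membership XOR parity of the count
theorem pv_contains_foldl_toggle (l : List Int) (s : PySem.Set Int) (y : Int) :
    PySem.Set.contains (l.foldl pvToggle s) y =
      xor (PySem.Set.contains s y) (decide (l.count y % 2 = 1)) := by
  induction l generalizing s with
  | nil => simp
  | cons a t ih =>
    rw [List.foldl_cons, ih, pv_contains_toggle]
    by_cases hya : y = a
    · subst hya
      rw [if_pos rfl, List.count_cons_self, pv_decide_succ_mod_two]
      cases h : PySem.Set.contains s y <;> simp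
    · rw [if_neg hya, List.count_cons_of_ne (Ne.symm hya)]

theorem pv_scanMem_eq_find? (odd : PySem.Set Int) (l : List Int) :
    pvScanMem odd l = l.find? (fun x => PySem.Set.contains odd x) := by
  induction l with
  | nil => rfl
  | cons a t ih =>
    simp only [pvScanMem, List.find?]
    split_ifs with h
    · rw [show (PySem.Set.contains odd a) = true from h]
    · rw [show (PySem.Set.contains odd a) = false from by simpa using h]
      exact ih

-- ===== VERDICT (by name: the statement is the Claim_ definition above) =====
theorem solution_spec : Claim_equal_solution := by
  intro A _
  unfold Spec_solution
  simp only [solution, solution_alt]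
  rw [pvA_dict, PySem.Dict.items_counter,
    pv_findOddItem_map (fun k => (A.reverse.count k : Int)),
    pv_find?_ofList, pv_scanMem_eq_find?]
  have hp : (fun k => (PySem.Int.mod ((A.reverse.count k : Nat) : Int) 2 == 1))
      = (fun x => PySem.Set.contains (A.foldl pvToggle PySem.Set.empty) x) := by
    funext x
    rw [pv_contains_foldl_toggle, List.count_reverse]
    have : PySem.Int.mod ((A.count x : Nat) : Int) 2 = ((A.count x % 2 : Nat) : Int) := by
      exact_mod_cast PySem.Int.mod_natCast (A.count x) 2
    rw [this]
    simp only [PySem.Set.contains, PySem.Set.empty]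
    rcases Nat.mod_two_eq_zero_or_one (A.count x) with h | h <;> simp [h]
  rw [hp]
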